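-- pv_equiv track=rewrite | github.com/Soumik2426/phishing-guardian | backend/engine/tld_analysis.py | analyze_tld
-- ===== SOURCE A (Python) =====
-- SUSPICIOUS_TLDS = [".tk", ".ml", ".ga", ".cf", ".gq", ".xyz"]
--
-- def analyze_tld(root_domain: str):
--     for tld in SUSPICIOUS_TLDS:
--         if root_domain.endswith(tld):
--             return [{
--                 "category": "suspicious_tld",
--                 "severity": "medium",
--                 "simple_reason": f"The domain uses '{tld}', which is commonly abused in phishing attacks."
--             }]
--
--     return []
-- ===== SOURCE B (Python) =====
-- SUSPICIOUS_TLD_SET = {".tk", ".ml", ".ga", ".cf", ".gq", ".xyz"}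
--
-- def analyze_tld(root_domain: str):
--     if '.' not in root_domain:
--         return []
--     tld = '.' + root_domain.rsplit('.', 1)[-1]
--     if tld in SUSPICIOUS_TLD_SET:
--         return [{
--             "category": "suspicious_tld",
--             "severity": "medium",
--             "simple_reason": f"The domain uses '{tld}', which is commonly abused in phishing attacks."
--         }]
--     return []
-- ===== Notes on version B (the rewrite author's own statement) =====
-- stated objective: idiomatic
-- what changed: Instead of six sequential endswith checks over a list, B extracts the domain's final '.'-suffix once with rsplit and does a single set-membership test, building the message from the extracted suffix.
import Mathlib
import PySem

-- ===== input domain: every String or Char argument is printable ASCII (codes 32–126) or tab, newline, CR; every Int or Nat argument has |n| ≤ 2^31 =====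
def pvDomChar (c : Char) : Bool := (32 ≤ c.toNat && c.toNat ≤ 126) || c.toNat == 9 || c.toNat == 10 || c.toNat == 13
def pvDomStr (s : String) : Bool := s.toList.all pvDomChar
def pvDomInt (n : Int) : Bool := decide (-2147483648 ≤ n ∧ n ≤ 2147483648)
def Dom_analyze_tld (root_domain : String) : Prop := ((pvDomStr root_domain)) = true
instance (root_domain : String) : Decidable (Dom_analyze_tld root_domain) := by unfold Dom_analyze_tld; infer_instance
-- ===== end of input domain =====

-- B replaces A's six sequential endswith checks by extracting the final '.'-suffix once
-- and doing a single set-membership test (idiomatic; same behaviour).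

-- ===== PORT A =====
def SUSPICIOUS_TLDS : List String := [".tk", ".ml", ".ga", ".cf", ".gq", ".xyz"]

-- the 'for tld in SUSPICIOUS_TLDS: if …: return …' loop, with its early return
def pvLoopA : List String → String → List (List (String × String))
  | [], _ => []
  | tld :: rest, s =>
      if PySem.Str.endswith s tld then
        [[("category", "suspicious_tld"),
          ("severity", "medium"),
          ("simple_reason",
            "The domain uses '" ++ tld ++ "', which is commonly abused in phishing attacks.")]]
      else pvLoopA rest s

def analyze_tld (root_domain : String) : List (List (String × String)) :=
  pvLoopA SUSPICIOUS_TLDS root_domain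

-- ===== PORT B =====
-- Python set of TLDs: distinct elements, membership test only
def SUSPICIOUS_TLD_SET : List String := [".tk", ".ml", ".ga", ".cf", ".gq", ".xyz"]

def analyze_tld_alt (root_domain : String) : List (List (String × String)) :=
  if PySem.Str.isIn "." root_domain then
    -- root_domain.rsplit('.', 1)[-1]: the characters after the LAST '.' (exact here since '.' is present)
    let lbl : List Char := (root_domain.toList.reverse.takeWhile (· ≠ '.')).reverse
    let tld : String := String.ofList ('.' :: lbl)
    if tld ∈ SUSPICIOUS_TLD_SET then
      [[("category", "suspicious_tld"),
        ("severity", "medium"),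
        ("simple_reason",
          "The domain uses '" ++ tld ++ "', which is commonly abused in phishing attacks.")]]
    else []
  else []

-- ===== PRECONDITION & SPEC =====
def Spec_analyze_tld (root_domain : String) (out : List (List (String × String))) : Prop := out = analyze_tld_alt root_domain
instance (root_domain : String) (out : List (List (String × String))) : Decidable (Spec_analyze_tld root_domain out) := by unfold Spec_analyze_tld; infer_instance

-- ===== CLAIM (what is proved, stated in full; the proofs are below) =====
def Claim_equal_analyze_tld : Prop := ∀ (root_domain : String), Dom_analyze_tld root_domain → Spec_analyze_tld root_domain (analyze_tld root_domain)

-- ===== LEMMAS AND PROOFS =====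

-- if dropWhile p l is a cons, its head refutes p
lemma pv_dropWhile_cons_head {α : Type} (p : α → Bool) (l : List α) (c : α) (tl : List α)
    (h : l.dropWhile p = c :: tl) : p c = false := by
  induction l with
  | nil => simp at h
  | cons a as ih =>
      by_cases ha : p a
      · rw [List.dropWhile_cons_of_pos ha] at h; exact ih h
      · rw [List.dropWhile_cons_of_neg ha] at h
        cases h; simpa using ha

lemma pv_takeWhile_no_dot (pre rest : List Char) (h : '.' ∉ pre) :
    (pre ++ '.' :: rest).takeWhile (· ≠ '.') = pre := by
  induction pre with
  | nil => simp
  | cons a as ih =>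
      have ha : a ≠ '.' := by intro e; exact h (by simp [e])
      have h' : '.' ∉ as := fun hm => h (List.mem_cons_of_mem _ hm)
      simpa [ha] using ih h'

-- (pre ++ ['.']) is a prefix of r  ↔  '.' occurs in r and pre is exactly the part of r before its first '.'
lemma pv_prefix_dot (r pre : List Char) (h : '.' ∉ pre) :
    ((pre ++ ['.']) <+: r) ↔ ('.' ∈ r ∧ r.takeWhile (· ≠ '.') = pre) := by
  constructor
  · rintro ⟨rest, hr⟩
    have hr' : r = pre ++ '.' :: rest := by simpa using hr.symm
    subst hr'
    exact ⟨by simp, pv_takeWhile_no_dot pre rest h⟩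
  · rintro ⟨hdot, htw⟩
    have hsplit := List.takeWhile_append_dropWhile (p := fun c => decide (c ≠ '.')) (l := r)
    cases hd : r.dropWhile (fun c => decide (c ≠ '.')) with
    | nil =>
        exfalso
        have hr2 : r.takeWhile (fun c => decide (c ≠ '.')) = r := by
          have := hsplit; rw [hd, List.append_nil] at this; exact this
        have hmem : '.' ∈ r.takeWhile (fun c => decide (c ≠ '.')) := hr2.symm ▸ hdot
        have hP := List.mem_takeWhile_imp hmem
        simp at hP
    | cons ch tl =>
        have hc : ch = '.' := by
          have := pv_dropWhile_cons_head (fun c => decide (c ≠ '.')) r ch tl hd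
          simpa using this
        subst hc
        refine ⟨tl, ?_⟩
        have hr3 : pre ++ '.' :: tl = r := by
          rw [← htw, ← hd]; exact hsplit
        simpa using hr3

lemma pv_ofList_inj (a b : List Char) : String.ofList a = String.ofList b ↔ a = b := by
  constructor
  · intro h; have := congrArg String.toList h; simpa using this
  · rintro rfl; rfl

-- A's endswith test, characterised through B's last-label extraction
lemma pv_endswith_iff (s : String) (lbl : List Char) (h : '.' ∉ lbl) :
    (PySem.Str.endswith s (String.ofList ('.' :: lbl)) = true) ↔
      ('.' ∈ s.toList ∧ (s.toList.reverse.takeWhile (· ≠ '.')).reverse = lbl) := by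
  have hb : PySem.Str.endswith s (String.ofList ('.' :: lbl)) =
      PySem.Chars.endswith s.toList ('.' :: lbl) := by simp
  rw [hb, PySem.Chars.endswith_iff, ← List.reverse_prefix]
  have h2 : ('.' :: lbl).reverse = lbl.reverse ++ ['.'] := by simp
  rw [h2, pv_prefix_dot _ _ (by simpa using h)]
  constructor
  · rintro ⟨hd, ht⟩; exact ⟨by simpa using hd, by rw [ht]; simp⟩
  · rintro ⟨hd, ht⟩; exact ⟨by simpa using hd, by rw [← ht]; simp⟩

lemma pv_isIn_dot (s : String) : (PySem.Str.isIn "." s = true) ↔ '.' ∈ s.toList := by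
  rw [PySem.Str.isIn_iff_infix]
  constructor
  · rintro ⟨l₁, l₂, hinf⟩
    have : '.' ∈ l₁ ++ ".".toList ++ l₂ := by simp
    rwa [hinf] at this
  · intro hm
    obtain ⟨l₁, l₂, hsp⟩ := List.append_of_mem hm
    exact ⟨l₁, l₂, by simp [hsp]⟩

lemma pv_main (s : String) : analyze_tld s = analyze_tld_alt s := by
  have e1 := pv_endswith_iff s ['t','k'] (by decide)
  have e2 := pv_endswith_iff s ['m','l'] (by decide)
  have e3 := pv_endswith_iff s ['g','a'] (by decide)
  have e4 := pv_endswith_iff s ['c','f'] (by decide)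
  have e5 := pv_endswith_iff s ['g','q'] (by decide)
  have e6 := pv_endswith_iff s ['x','y','z'] (by decide)
  have m1 : (".tk" : String) = String.ofList ['.','t','k'] := rfl
  have m2 : (".ml" : String) = String.ofList ['.','m','l'] := rfl
  have m3 : (".ga" : String) = String.ofList ['.','g','a'] := rfl
  have m4 : (".cf" : String) = String.ofList ['.','c','f'] := rfl
  have m5 : (".gq" : String) = String.ofList ['.','g','q'] := rfl
  have m6 : (".xyz" : String) = String.ofList ['.','x','y','z'] := rfl
  unfold analyze_tld analyze_tld_alt SUSPICIOUS_TLDS SUSPICIOUS_TLD_SET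
  simp only [pvLoopA, m1, m2, m3, m4, m5, m6]
  by_cases hdot : '.' ∈ s.toList
  · have hin : PySem.Str.isIn "." s = true := (pv_isIn_dot s).mpr hdot
    set lab := (s.toList.reverse.takeWhile (· ≠ '.')).reverse with hlab
    rw [if_pos hin]
    by_cases q1 : lab = ['t','k']
    · rw [if_pos (e1.mpr ⟨hdot, q1⟩), q1]
      decide
    · rw [if_neg (fun hx => q1 (e1.mp hx).2)]
      by_cases q2 : lab = ['m','l']
      · rw [if_pos (e2.mpr ⟨hdot, q2⟩), q2]
        decide
      · rw [if_neg (fun hx => q2 (e2.mp hx).2)]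
        by_cases q3 : lab = ['g','a']
        · rw [if_pos (e3.mpr ⟨hdot, q3⟩), q3]
          decide
        · rw [if_neg (fun hx => q3 (e3.mp hx).2)]
          by_cases q4 : lab = ['c','f']
          · rw [if_pos (e4.mpr ⟨hdot, q4⟩), q4]
            decide
          · rw [if_neg (fun hx => q4 (e4.mp hx).2)]
            by_cases q5 : lab = ['g','q']
            · rw [if_pos (e5.mpr ⟨hdot, q5⟩), q5]
              decide
            · rw [if_neg (fun hx => q5 (e5.mp hx).2)]
              by_cases q6 : lab = ['x','y','z']
              · rw [if_pos (e6.mpr ⟨hdot, q6⟩), q6]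
                decide
              · rw [if_neg (fun hx => q6 (e6.mp hx).2)]
                rw [if_neg]
                simp only [List.mem_cons, pv_ofList_inj, List.not_mem_nil]
                intro hmem
                rcases hmem with h | h | h | h | h | h
                · exact q1 (by simpa using h)
                · exact q2 (by simpa using h)
                · exact q3 (by simpa using h)
                · exact q4 (by simpa using h)
                · exact q5 (by simpa using h)
                · exact q6 (by simpa using h)
  · have hin : ¬ PySem.Str.isIn "." s = true := fun hx => hdot ((pv_isIn_dot s).mp hx)
    rw [if_neg hin,
        if_neg (fun hx => hdot (e1.mp hx).1),
        if_neg (fun hx => hdot (e2.mp hx).1),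
        if_neg (fun hx => hdot (e3.mp hx).1),
        if_neg (fun hx => hdot (e4.mp hx).1),
        if_neg (fun hx => hdot (e5.mp hx).1),
        if_neg (fun hx => hdot (e6.mp hx).1)]

-- ===== VERDICT (by name: the statement is the Claim_ definition above) =====
theorem analyze_tld_spec : Claim_equal_analyze_tld := by
  intro s _
  unfold Spec_analyze_tld
  exact pv_main s
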